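-- pv_equiv track=rewrite | github.com/chloe1129/algorithm_work | 프로그래머스/lv1/155652. 둘만의 암호/둘만의 암호.py | solution
-- ===== SOURCE A (Python) =====
-- def solution(s, skip, index):
--     answer = ''
--
--     for i in s:
--         j = index
--         char = ord(i)
--         while (j != 0):
--             char += 1
--             if char > ord('z'):
--                 char = char - ord('z') + ord('a')-1
--
--             if chr(char) in skip:
--                 continue
--             j -= 1
--
--
--         answer += chr(char)
--
--     return answer
-- ===== SOURCE B (Python) =====
-- def solution(s, skip, index):
--     skipset = set(skip)
--     allowed = [chr(k) for k in range(97, 123) if chr(k) not in skipset]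
--     def shift(ch):
--         if index == 0:
--             return ch
--         first = ord(ch) + 1
--         if first > 122:
--             first -= 26
--         pre = [chr(k) for k in range(first, 123) if chr(k) not in skipset]
--         if index <= len(pre):
--             return pre[index - 1]
--         r = index - len(pre)
--         return allowed[(r - 1) % len(allowed)]
--     return ''.join(map(shift, s))
-- ===== Notes on version B (the rewrite author's own statement) =====
-- stated objective: faster
-- what changed: A advances each character one step at a time (index iterations each, re-scanning skip per step); B precomputes the non-skipped letter list once and jumps to the answer by modular indexing, in O(|s| + |skip|) after the per-character 26-code prefix scan.
import Mathlib
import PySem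

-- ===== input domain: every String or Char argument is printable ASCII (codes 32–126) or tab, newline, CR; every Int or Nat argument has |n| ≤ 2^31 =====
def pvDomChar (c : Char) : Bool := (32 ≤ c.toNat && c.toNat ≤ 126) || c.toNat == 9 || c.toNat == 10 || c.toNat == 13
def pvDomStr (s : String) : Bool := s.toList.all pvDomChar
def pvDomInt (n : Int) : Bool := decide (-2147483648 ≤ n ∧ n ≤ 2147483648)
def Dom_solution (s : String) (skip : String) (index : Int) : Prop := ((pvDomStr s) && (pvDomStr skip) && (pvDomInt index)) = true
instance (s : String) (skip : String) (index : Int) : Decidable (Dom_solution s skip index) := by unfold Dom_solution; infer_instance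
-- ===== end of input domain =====

-- B replaces A's step-by-step while loop (index iterations per character) by direct modular
-- indexing into the precomputed list of non-skipped letters: O(|s|·index) → O(|s| + |skip|).

-- ===== PORT A =====
-- the while loop of A, one fuel unit per iteration; inside Pre_solution the fuel
-- 26*index+150 provably exceeds the number of iterations, so the port is exact there
def loopA (skip : String) : Nat → Int → Int → Int
  | 0, _, char => char
  | fuel+1, j, char =>
    if j = 0 then char
    else
      let char1 := char + 1
      let char2 := if char1 > 122 then char1 - 122 + 97 - 1 else char1
      if skip.toList.contains (Char.ofNat char2.toNat) then
        loopA skip fuel j char2            -- chr(char) in skip: continue (j unchanged)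
      else
        loopA skip fuel (j - 1) char2      -- j -= 1

def solution (s : String) (skip : String) (index : Int) : String :=
  String.mk (s.toList.foldl
    (fun answer i => answer ++ [Char.ofNat (loopA skip (26 * index.toNat + 150) index ((i.toNat : Int))).toNat])
    [])

-- ===== PORT B =====
-- port of Source B's local function shift(ch); skipset/allowed/index are its closure variables.
-- pre[index-1] / allowed[(r-1) % len(allowed)] are ported with pyGet?; the '.getD 'a'' and the
-- length-0 guard totalise the IndexError / ZeroDivisionError cases, which Pre_solution excludes.
def shiftB (skipset : List Char) (allowed : List Char) (index : Int) (ch : Char) : Char :=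
  if index = 0 then ch
  else
    let first0 := ch.toNat + 1
    let first := if first0 > 122 then first0 - 26 else first0
    -- range(first, 123) with 0 ≤ first: exactly List.range' first (123 - first)
    let pre := ((List.range' first (123 - first)).map Char.ofNat).filter (fun c => !(skipset.contains c))
    if index ≤ (pre.length : Int) then (PySem.List.pyGet? pre (index - 1)).getD 'a'
    else
      let r := index - (pre.length : Int)
      if allowed.length = 0 then 'a'
      else (PySem.List.pyGet? allowed (PySem.Int.mod (r - 1) (allowed.length : Int))).getD 'a'

def solution_alt (s : String) (skip : String) (index : Int) : String :=
  let skipset := skip.toList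
  let allowed := ((List.range' 97 26).map Char.ofNat).filter (fun c => !(skipset.contains c))
  String.mk (s.toList.map (shiftB skipset allowed index))

-- ===== PRECONDITION & SPEC =====
-- helpers for Pre_: the non-skipped characters with codes in [first, 123), and the first code
-- A's loop visits for a character c (one wrap applied, as in A's first iteration)
def segChars (skip : String) (first : Nat) : List Char :=
  ((List.range' first (123 - first)).map Char.ofNat).filter (fun c => !(skip.toList.contains c))

def pvFirst (c : Char) : Nat := if c.toNat + 1 > 122 then c.toNat + 1 - 26 else c.toNat + 1

-- Pre_ excludes exactly the inputs on which A's while loop never terminates: a negative index,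
-- and an index > 0 such that every lowercase letter is in skip while some character of s has
-- fewer than index non-skipped codes before its first wrap ('a'..'z' is the cycle after a wrap).
def Pre_solution (s : String) (skip : String) (index : Int) : Prop :=
  0 ≤ index ∧ (index = 0 ∨ segChars skip 97 ≠ [] ∨
    ∀ c ∈ s.toList, index ≤ ((segChars skip (pvFirst c)).length : Int))
instance (s : String) (skip : String) (index : Int) : Decidable (Pre_solution s skip index) := by
  unfold Pre_solution; infer_instance

def pvWitness_solution : String × String × Int := ("hello world", "wol", 5)

def Spec_solution (s : String) (skip : String) (index : Int) (out : String) : Prop := out = solution_alt s skip index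
instance (s : String) (skip : String) (index : Int) (out : String) : Decidable (Spec_solution s skip index out) := by unfold Spec_solution; infer_instance

-- ===== CLAIM (what is proved, stated in full; the proofs are below) =====
def Claim_equal_solution : Prop := ∀ (s : String) (skip : String) (index : Int), Dom_solution s skip index → Pre_solution s skip index → Spec_solution s skip index (solution s skip index)

-- ===== LEMMAS AND PROOFS =====

theorem char_toNat_ofNat (k : Nat) (h : k < 55296) : (Char.ofNat k).toNat = k := by
  unfold Char.ofNat Char.toNat
  split
  · rfl
  · next hv =>
    exfalso
    have := (by simpa [Nat.isValidChar] using hv : 55296 ≤ k ∧ (57343 < k → 1114112 ≤ k))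
    omega

theorem loopA_zero (skip : String) (f : Nat) (c : Int) : loopA skip f 0 c = c := by
  cases f <;> simp [loopA]

-- the loop consumes the non-wrap segment (char+1 .. 122): either j reaches 0 inside it
-- (result = n-th non-skipped code) or it arrives at 122 having used exactly len fuel
theorem seg_lemma (skip : String) :
    ∀ (len : Nat), len ≤ 113 → ∀ (fuel n : Nat), 1 ≤ n → len ≤ fuel →
      loopA skip fuel (n : Int) (122 - (len : Int)) =
        (if n ≤ (segChars skip (123 - len)).length
         then (((segChars skip (123 - len)).getD (n - 1) 'a').toNat : Int)
         else loopA skip (fuel - len) ((n - (segChars skip (123 - len)).length : Nat) : Int) 122) := by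
  intro len
  induction len with
  | zero =>
    intro _ fuel n hn hf
    have hseg : segChars skip (123 - 0) = [] := by simp [segChars]
    rw [hseg]
    simp only [List.length_nil]
    rw [if_neg (by omega)]
    norm_num
  | succ len ih =>
    intro hlen fuel n hn hf
    obtain ⟨f, rfl⟩ : ∃ f, fuel = f + 1 := ⟨fuel - 1, by omega⟩
    have hn0 : (n : Int) ≠ 0 := by omega
    have e1 : (122 - ((len + 1 : Nat) : Int) + 1) = 122 - (len : Int) := by push_cast; ring
    have e2 : ¬ (122 - (len : Int) > 122) := by omega
    have e3 : (122 - (len : Int)).toNat = 122 - len := by omega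
    have hlt : 122 - len < 55296 := by omega
    have hsplit : segChars skip (123 - (len + 1)) =
        if skip.toList.contains (Char.ofNat (122 - len)) then segChars skip (123 - len)
        else Char.ofNat (122 - len) :: segChars skip (123 - len) := by
      unfold segChars
      have h1 : 123 - (len + 1) = 122 - len := by omega
      have h2 : 123 - (122 - len) = len + 1 := by omega
      have h3 : 122 - len + 1 = 123 - len := by omega
      have h4 : 123 - (123 - len) = len := by omega
      rw [h1, h2, h4, List.range'_succ, h3, List.map_cons, List.filter_cons]
      by_cases hcin : Char.ofNat (122 - len) ∈ skip.toList
      · simp [hcin]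
      · simp [hcin]
    simp only [loopA, hn0, if_false, e1]
    rw [if_neg e2, e3]
    by_cases hcin : skip.toList.contains (Char.ofNat (122 - len)) = true
    · rw [if_pos hcin]
      rw [ih (by omega) f n hn (by omega), hsplit, if_pos hcin]
      have : f + 1 - (len + 1) = f - len := by omega
      rw [this]
    · rw [if_neg hcin]
      rw [hsplit, if_neg hcin]
      by_cases hn1 : n = 1
      · subst hn1
        norm_num
        rw [loopA_zero, char_toNat_ofNat _ hlt]
        omega
      · have ecast : ((n : Int) - 1) = ((n - 1 : Nat) : Int) := by omega
        rw [ecast, ih (by omega) f (n - 1) (by omega) (by omega)]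
        simp only [List.length_cons]
        by_cases hle : n ≤ (segChars skip (123 - len)).length + 1
        · rw [if_pos (by omega), if_pos hle]
          have : n - 1 = (n - 2) + 1 := by omega
          rw [this, List.getD_cons_succ]
          norm_num
        · rw [if_neg (by omega), if_neg hle]
          have h4 : f + 1 - (len + 1) = f - len := by omega
          have h5 : n - 1 - (segChars skip (123 - len)).length = n - ((segChars skip (123 - len)).length + 1) := by omega
          rw [h4, h5]

-- one wrap: from a char in [122,126] the loop behaves as from char-26
theorem wrap_shift (skip : String) (f : Nat) (n : Int) (c : Int) (hn : n ≠ 0) (hf : 1 ≤ f)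
    (h1 : 122 ≤ c) (h2 : c ≤ 126) : loopA skip f n c = loopA skip f n (c - 26) := by
  obtain ⟨f', rfl⟩ : ∃ f', f = f' + 1 := ⟨f - 1, by omega⟩
  simp only [loopA, hn, if_false]
  have e1 : (if c + 1 > 122 then c + 1 - 122 + 97 - 1 else c + 1) = c - 25 := by
    rw [if_pos (by omega)]; omega
  have e2 : (if c - 26 + 1 > 122 then c - 26 + 1 - 122 + 97 - 1 else c - 26 + 1) = c - 25 := by
    rw [if_neg (by omega)]; omega
  rw [e1, e2]

-- from 122 the loop cycles over 'a'..'z'; modular indexing into the allowed letters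
theorem cycle_lemma (skip : String) (ha : segChars skip 97 ≠ []) :
    ∀ (n : Nat), 1 ≤ n → ∀ (fuel : Nat), 26 * n ≤ fuel →
      loopA skip fuel (n : Int) 122 =
        (((segChars skip 97).getD ((n - 1) % (segChars skip 97).length) 'a').toNat : Int) := by
  intro n
  induction n using Nat.strong_induction_on with
  | _ n ih =>
    intro hn fuel hfuel
    have hn0 : (n : Int) ≠ 0 := by omega
    rw [wrap_shift skip fuel (n : Int) 122 hn0 (by omega) (by norm_num) (by norm_num)]
    have e26 : (122 : Int) - 26 = 122 - ((26 : Nat) : Int) := by norm_num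
    rw [e26, seg_lemma skip 26 (by norm_num) fuel n hn (by omega)]
    have h97 : (123 : Nat) - 26 = 97 := by norm_num
    rw [h97]
    have ha1 : 1 ≤ (segChars skip 97).length := by
      cases h : segChars skip 97
      · exact absurd h ha
      · simp
    by_cases hle : n ≤ (segChars skip 97).length
    · rw [if_pos hle, Nat.mod_eq_of_lt (by omega)]
    · rw [if_neg hle]
      rw [ih (n - (segChars skip 97).length) (by omega) (by omega) (fuel - 26) (by omega)]
      have hmod : (n - (segChars skip 97).length - 1) % (segChars skip 97).length
          = (n - 1) % (segChars skip 97).length := by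
        conv_rhs => rw [show n - 1 = (n - (segChars skip 97).length - 1) + (segChars skip 97).length from by omega]
        rw [Nat.add_mod_right]
      rw [hmod]

theorem char_lemma (skip : String) (index : Int) (c : Char) (hc9 : 9 ≤ c.toNat)
    (hc126 : c.toNat ≤ 126) (hidx : 0 ≤ index)
    (hterm : index = 0 ∨ segChars skip 97 ≠ [] ∨ index ≤ ((segChars skip (pvFirst c)).length : Int)) :
    loopA skip (26 * index.toNat + 150) index ((c.toNat : Int)) =
      ((shiftB skip.toList (((List.range' 97 26).map Char.ofNat).filter (fun c => !(skip.toList.contains c))) index c).toNat : Int) := by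
  by_cases h0 : index = 0
  · subst h0
    rw [loopA_zero]
    simp [shiftB]
  · obtain ⟨n, rfl⟩ : ∃ n : Nat, index = (n : Int) := ⟨index.toNat, by omega⟩
    have hn : 1 ≤ n := by omega
    rw [Int.toNat_natCast]
    set first := pvFirst c with hfirst
    have hfb : 10 ≤ first ∧ first ≤ 122 := by
      rw [hfirst]; unfold pvFirst; split_ifs <;> omega
    set len := 123 - first with hlen
    have hstep : loopA skip (26 * n + 150) (n : Int) ((c.toNat : Int)) =
        loopA skip (26 * n + 150) (n : Int) (122 - (len : Int)) := by
      by_cases hsm : c.toNat ≤ 121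
      · have hfv : first = c.toNat + 1 := by
          rw [hfirst]; unfold pvFirst; rw [if_neg (by omega)]
        have : ((c.toNat : Int)) = 122 - (len : Int) := by omega
        rw [this]
      · have hfv : first = c.toNat + 1 - 26 := by
          rw [hfirst]; unfold pvFirst; rw [if_pos (by omega)]
        rw [wrap_shift skip _ _ _ (by omega) (by omega) (by omega) (by omega)]
        have : ((c.toNat : Int)) - 26 = 122 - (len : Int) := by omega
        rw [this]
    rw [hstep, seg_lemma skip len (by omega) (26 * n + 150) n hn (by omega)]
    have h123 : 123 - len = first := by omega
    rw [h123]
    simp only [shiftB]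
    rw [if_neg h0]
    rw [show (if c.toNat + 1 > 122 then c.toNat + 1 - 26 else c.toNat + 1) = first from by rw [hfirst]; rfl]
    rw [show ((List.range' first (123 - first)).map Char.ofNat).filter (fun x => !(skip.toList.contains x)) = segChars skip first from rfl]
    by_cases hle : n ≤ (segChars skip first).length
    · rw [if_pos hle, if_pos (by exact_mod_cast hle)]
      rw [show ((n : Int) - 1) = ((n - 1 : Nat) : Int) from by omega]
      have hlt2 : n - 1 < (segChars skip first).length := by omega
      simp [PySem.List.pyGet?_natCast, List.getElem?_eq_getElem hlt2, List.getD_eq_getElem?_getD]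
    · rw [if_neg hle, if_neg (by exact_mod_cast hle)]
      have hall : (((List.range' 97 26).map Char.ofNat).filter (fun c => !(skip.toList.contains c))) = segChars skip 97 := by
        unfold segChars; norm_num
      have ha : segChars skip 97 ≠ [] := by
        rcases hterm with h | h | h
        · exact absurd h h0
        · exact h
        · exact absurd (by exact_mod_cast h) hle
      rw [hall]
      have ha1 : 1 ≤ (segChars skip 97).length := by
        cases h : segChars skip 97
        · exact absurd h ha
        · simp
      rw [cycle_lemma skip ha (n - (segChars skip first).length) (by omega) (26 * n + 150 - len) (by omega)]
      rw [if_neg (by omega)]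
      rw [show ((n : Int) - ((segChars skip first).length : Int) - 1)
            = ((n - (segChars skip first).length - 1 : Nat) : Int) from by omega]
      rw [PySem.Int.mod_natCast]
      rw [PySem.List.pyGet?_natCast]
      have hmlt : (n - (segChars skip first).length - 1) % (segChars skip 97).length < (segChars skip 97).length :=
        Nat.mod_lt _ (by omega)
      simp [List.getElem?_eq_getElem hmlt, List.getD_eq_getElem?_getD]

theorem foldl_push {α β : Type} (g : α → β) :
    ∀ (l : List α) (acc : List β), l.foldl (fun a i => a ++ [g i]) acc = acc ++ l.map g := by
  intro l
  induction l with
  | nil => simp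
  | cons x xs ih => intro acc; simp [List.foldl, ih]

-- ===== VERDICT (by name: the statement is the Claim_ definition above) =====
theorem solution_spec : Claim_equal_solution := by
  intro s skip index hdom hpre
  unfold Spec_solution solution solution_alt
  rw [foldl_push]
  simp only [List.nil_append]
  congr 1
  apply List.map_congr_left
  intro c hc
  obtain ⟨hidx, hterm⟩ := hpre
  have hdc : pvDomChar c = true := by
    have hs : pvDomStr s = true := by
      unfold Dom_solution at hdom; simp at hdom; exact hdom.1.1
    exact List.all_eq_true.mp hs c hc
  have hc9 : 9 ≤ c.toNat := by unfold pvDomChar at hdc; simp at hdc; omega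
  have hc126 : c.toNat ≤ 126 := by unfold pvDomChar at hdc; simp at hdc; omega
  have hterm' : index = 0 ∨ segChars skip 97 ≠ [] ∨ index ≤ ((segChars skip (pvFirst c)).length : Int) := by
    rcases hterm with h | h | h
    · exact Or.inl h
    · exact Or.inr (Or.inl h)
    · exact Or.inr (Or.inr (h c hc))
  have := char_lemma skip index c hc9 hc126 hidx hterm'
  rw [this]
  have : ((shiftB skip.toList (((List.range' 97 26).map Char.ofNat).filter (fun c => !(skip.toList.contains c))) index c).toNat : Int).toNat
      = (shiftB skip.toList (((List.range' 97 26).map Char.ofNat).filter (fun c => !(skip.toList.contains c))) index c).toNat := Int.toNat_natCast _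
  rw [this, Char.ofNat_toNat]
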